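-- pv_equiv track=rewrite | github.com/AlexLacour/advent-of-code-monorepo | 2024/scripts/9.py | parse_memory
-- ===== SOURCE A (Python) =====
-- def parse_memory(disk_map: list[int]) -> list[tuple]:
--     # put memory into a readable format
--     memory = []
--     for disk_name, disk_index in enumerate(range(0, len(disk_map), 2)):
--         memory.append((disk_name, sum(disk_map[:disk_index]), disk_map[disk_index]))
--
--     empty_spaces = []
--     for disk, next_disk in zip(memory, memory[1:]):
--         _, disk_start_index, disk_size = disk
--         _, next_disk_start_index, _ = next_disk
--
--         empty_space_size = next_disk_start_index - (disk_start_index + disk_size)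
--
--         if empty_space_size:
--             empty_spaces.append((None, disk_start_index + disk_size, empty_space_size))
--
--     memory = sorted([*memory, *empty_spaces], key=lambda mem_space: mem_space[1])
--
--     return memory
-- ===== SOURCE B (Python) =====
-- def parse_memory(disk_map: list[int]) -> list[tuple]:
--     # One pass with a running prefix sum (no per-file re-summing of a slice);
--     # the gap after file k is simply disk_map[2k+1], no zip over the memory list needed.
--     files = []
--     gaps = []
--     pos = 0
--     name = 0
--     n = len(disk_map)
--     for i in range(0, n, 2):
--         size = disk_map[i]
--         files.append((name, pos, size))
--         if i + 2 < n and disk_map[i + 1]: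
--             gaps.append((None, pos + size, disk_map[i + 1]))
--         if i + 1 < n:
--             pos += size + disk_map[i + 1]
--         name += 1
--     return sorted(files + gaps, key=lambda m: m[1])
-- ===== Notes on version B (the rewrite author's own statement) =====
-- stated objective: faster
-- what changed: Single pass with a running prefix sum and the gap read directly as disk_map[2k+1], instead of re-summing disk_map[:i] for every file and a second zip-pass over adjacent memory entries.
import Mathlib
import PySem

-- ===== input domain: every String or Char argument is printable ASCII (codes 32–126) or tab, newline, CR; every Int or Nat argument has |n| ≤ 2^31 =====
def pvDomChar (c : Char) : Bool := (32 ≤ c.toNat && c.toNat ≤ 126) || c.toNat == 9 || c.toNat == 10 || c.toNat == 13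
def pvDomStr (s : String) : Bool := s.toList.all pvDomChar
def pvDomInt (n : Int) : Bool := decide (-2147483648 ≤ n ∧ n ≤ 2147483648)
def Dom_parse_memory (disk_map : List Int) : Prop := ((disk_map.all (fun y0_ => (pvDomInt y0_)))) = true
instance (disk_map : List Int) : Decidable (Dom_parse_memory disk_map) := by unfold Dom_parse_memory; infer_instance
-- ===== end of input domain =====

-- B replaces A's quadratic re-summing of disk_map[:i] (and the second zip-pass deriving gaps
-- from adjacent memory entries) by one pass with a running prefix sum reading gaps directly.

-- ===== PORT A =====
-- disk_map[disk_index] is always in range (disk_index ∈ range(0, len, 2)), so pyGetD is exact here.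
def parse_memory (disk_map : List Int) : List (Option Int × Int × Int) :=
  let memory : List (Option Int × Int × Int) :=
    (PySem.List.enumerate (PySem.List.pyRange 0 (PySem.List.len disk_map) 2) 0).foldl
      (fun acc p =>
        acc ++ [(some p.1, (PySem.List.slice disk_map none (some p.2)).sum,
                 PySem.List.pyGetD disk_map p.2 0)]) []
  let empty_spaces : List (Option Int × Int × Int) :=
    (memory.zip (PySem.List.slice memory (some 1) none)).foldl
      (fun acc p =>
        if p.2.2.1 - (p.1.2.1 + p.1.2.2) ≠ 0 then
          acc ++ [(none, p.1.2.1 + p.1.2.2, p.2.2.1 - (p.1.2.1 + p.1.2.2))]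
        else acc) []
  PySem.List.sorted (memory ++ empty_spaces) (fun m => m.2.1) false

-- ===== PORT B =====
-- The for-loop of Source B consuming disk_map two entries at a time (files, gaps, running pos).
def altGo (name pos : Int) : List Int → List (Option Int × Int × Int) × List (Option Int × Int × Int)
  | [] => ([], [])
  | [a] => ([(some name, pos, a)], [])
  | a :: b :: rest =>
    let r := altGo (name + 1) (pos + a + b) rest
    ((some name, pos, a) :: r.1,
     if rest ≠ [] ∧ b ≠ 0 then (none, pos + a, b) :: r.2 else r.2)

def parse_memory_alt (disk_map : List Int) : List (Option Int × Int × Int) :=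
  let r := altGo 0 0 disk_map
  PySem.List.sorted (r.1 ++ r.2) (fun m => m.2.1) false

-- ===== PRECONDITION & SPEC =====
def Spec_parse_memory (disk_map : List Int) (out : List (Option Int × Int × Int)) : Prop := out = parse_memory_alt disk_map
instance (disk_map : List Int) (out : List (Option Int × Int × Int)) : Decidable (Spec_parse_memory disk_map out) := by unfold Spec_parse_memory; infer_instance

-- ===== CLAIM (what is proved, stated in full; the proofs are below) =====
def Claim_equal_parse_memory : Prop := ∀ (disk_map : List Int), Dom_parse_memory disk_map → Spec_parse_memory disk_map (parse_memory disk_map)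

-- ===== LEMMAS AND PROOFS =====

-- The file list produced by B's loop, element by element.
theorem altGo_fst : ∀ (l : List Int) (name pos : Int),
    (altGo name pos l).1 =
      (List.range ((l.length + 1) / 2)).map
        (fun (k : Nat) => (some (name + (k : Int)), pos + ((l.take (2 * k)).sum), l.getD (2 * k) 0))
  | [], name, pos => by simp [altGo]
  | [a], name, pos => by simp [altGo]
  | a :: b :: rest, name, pos => by
    have ih := altGo_fst rest (name + 1) (pos + a + b)
    simp only [altGo, ih, List.length_cons]
    have h2 : (rest.length + 1 + 1 + 1) / 2 = (rest.length + 1) / 2 + 1 := by omega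
    rw [h2, List.range_succ_eq_map, List.map_cons, List.map_map]
    apply List.cons_eq_cons.mpr
    refine ⟨by simp, ?_⟩
    apply List.map_congr_left
    intro k hk
    simp only [Function.comp_apply]
    have ht : 2 * Nat.succ k = (2 * k + 1) + 1 := by omega
    rw [ht]
    simp only [List.take_succ_cons, List.sum_cons, List.getD_cons_succ]
    push_cast
    refine Prod.ext ?_ (Prod.ext ?_ ?_)
    · simp; ring
    · simp; ring
    · have ht2 : 2 * k + 1 + 1 = 2 * k + 2 := by omega
      simp

-- A's gap pass over adjacent file entries of B's file list yields B's gap list.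
theorem gaps_eq : ∀ (l : List Int) (name pos : Int) (acc : List (Option Int × Int × Int)),
    (((altGo name pos l).1).zip (((altGo name pos l).1).tail)).foldl
      (fun acc p =>
        if p.2.2.1 - (p.1.2.1 + p.1.2.2) ≠ 0 then
          acc ++ [(none, p.1.2.1 + p.1.2.2, p.2.2.1 - (p.1.2.1 + p.1.2.2))]
        else acc) acc
    = acc ++ (altGo name pos l).2
  | [], name, pos, acc => by simp [altGo]
  | [a], name, pos, acc => by simp [altGo]
  | a :: b :: rest, name, pos, acc => by
    match rest with
    | [] => simp [altGo]
    | c :: t =>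
      have ih := gaps_eq (c :: t) (name + 1) (pos + a + b)
      have hhd : ∃ tl, (altGo (name + 1) (pos + a + b) (c :: t)).1
          = (some (name + 1), pos + a + b, c) :: tl := by
        cases t with
        | nil => exact ⟨[], by simp [altGo]⟩
        | cons d t' => exact ⟨((some (name + 1 + 1), pos + a + b + c + d, d) :: []).tail ++ (altGo (name + 1 + 1) (pos + a + b + c + d) t').1, by simp [altGo]⟩
      obtain ⟨tl, htl⟩ := hhd
      simp only [altGo]
      rw [htl] at ih ⊢
      simp only [List.tail_cons, List.zip_cons_cons, List.foldl_cons] at ih ⊢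
      have harith : pos + a + b - (pos + a) = b := by ring
      rw [harith]
      by_cases hb : b = 0
      · rw [if_neg (by simp [hb])]
        rw [ih acc]
        simp [hb]
      · rw [if_pos hb]
        rw [ih (acc ++ [(none, pos + a, b)])]
        simp [hb, List.append_assoc]

-- A's first loop (prefix sums of slices over enumerate/range) builds exactly B's file list.
theorem files_eq (dm : List Int) :
    (PySem.List.enumerate (PySem.List.pyRange 0 (PySem.List.len dm) 2) 0).map
      (fun p => ((some p.1 : Option Int), (PySem.List.slice dm none (some p.2)).sum,
                 PySem.List.pyGetD dm p.2 0))
    = (altGo 0 0 dm).1 := by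
  rw [altGo_fst]
  rw [PySem.List.pyRange_of_pos 0 (PySem.List.len dm) (by norm_num)]
  have hM : (if (0:Int) < PySem.List.len dm then (((PySem.List.len dm) - 0 + 2 - 1) / 2).toNat else 0)
      = (dm.length + 1) / 2 := by
    simp only [PySem.List.len_eq]
    split_ifs with h
    · have h1 : ((dm.length : Int) - 0 + 2 - 1) = ((dm.length + 1 : Nat) : Int) := by push_cast; ring
      rw [h1]
      rw [show ((2:Int)) = ((2:Nat):Int) from rfl, ← Int.natCast_div, Int.toNat_natCast]
    · omega
  rw [hM]
  apply List.ext_getElem?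
  intro k
  simp only [List.getElem?_map, PySem.List.getElem?_enumerate]
  by_cases hk : k < (dm.length + 1) / 2
  · rw [List.getElem?_range hk]
    simp only [Option.map_some]
    have h2k : (0 : Int) + 2 * (k : Int) = ((2 * k : Nat) : Int) := by push_cast; ring
    simp only [h2k, PySem.List.slice_to_natCast, PySem.List.pyGetD_natCast]
    have hkk : (0 : Int) + (k : Int) = (k : Int) := by ring
    simp [hkk]
  · rw [List.getElem?_eq_none (by simpa using hk)]
    simp

-- ===== VERDICT (by name: the statement is the Claim_ definition above) =====
theorem parse_memory_spec : Claim_equal_parse_memory := by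
  intro dm _
  unfold Spec_parse_memory parse_memory parse_memory_alt
  simp only [PySem.List.foldl_append_singleton_eq_map, List.nil_append, PySem.List.slice_from_one]
  rw [files_eq]
  rw [gaps_eq dm 0 0 []]
  simp
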